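-- pv_equiv track=rewrite | github.com/YuhuYang/QuanSyn | lingnet.py | mapWordId
-- ===== SOURCE A (Python) =====
-- def mapWordId(contents):
--     mapping = {}
--     current_id = 0
--     for st in contents:
--         for word in st:
--             if word not in mapping:
--                 mapping[word] = current_id
--                 current_id += 1
--     return mapping
-- ===== SOURCE B (Python) =====
-- def mapWordId(contents):
--     words = [w for st in contents for w in st]
--     first = {}
--     for i, w in reversed(list(enumerate(words))):
--         first[w] = i
--     order = sorted(first, key=first.get)
--     return {w: i for i, w in enumerate(order)}
-- ===== Notes on version B (the rewrite author's own statement) =====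
-- stated objective: alternative
-- what changed: B never tests membership while scanning: one reverse pass overwrites a dict so each word ends up mapped to its first-occurrence position, then the distinct words are sorted by that position and enumerated to get 0-based ids.
import Mathlib
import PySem

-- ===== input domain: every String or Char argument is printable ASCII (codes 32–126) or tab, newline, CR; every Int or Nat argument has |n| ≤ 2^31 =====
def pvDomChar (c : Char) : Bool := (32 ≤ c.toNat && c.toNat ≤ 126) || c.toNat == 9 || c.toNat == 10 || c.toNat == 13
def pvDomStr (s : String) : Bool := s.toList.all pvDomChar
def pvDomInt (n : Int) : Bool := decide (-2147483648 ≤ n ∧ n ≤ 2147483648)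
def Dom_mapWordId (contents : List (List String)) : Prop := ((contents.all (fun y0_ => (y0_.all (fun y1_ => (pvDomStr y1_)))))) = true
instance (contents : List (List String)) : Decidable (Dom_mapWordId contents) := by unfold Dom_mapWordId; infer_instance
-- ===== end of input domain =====

-- B replaces A's dict-membership + running-counter pass by a reverse overwrite pass that
-- records each word's first-occurrence position, then sorts the distinct words by that
-- position and enumerates them; objective: alternative.

-- ===== PORT A =====
-- state: (mapping, current_id); both loops transliterated as folds over the same state
def mapWordId (contents : List (List String)) : List (String × Int) :=
  (contents.foldl
    (fun (acc : PySem.Dict String Int × Int) st =>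
      st.foldl
        (fun (acc : PySem.Dict String Int × Int) word =>
          if acc.1.contains word then acc
          else (acc.1.insert word acc.2, acc.2 + 1))
        acc)
    (PySem.Dict.empty, 0)).1.items

-- ===== PORT B =====
-- for i, w in reversed(list(enumerate(words))): first[w] = i ; then
-- sorted(first, key=first.get) — every iterated key is present in first, so
-- first.get w is always the stored Int and getD w 0 is exact there; finally
-- {w: i for i, w in enumerate(order)}
def mapWordId_alt (contents : List (List String)) : List (String × Int) :=
  let words := contents.flatMap (fun st => st)
  let first := (PySem.List.enumerate words 0).reverse.foldl
    (fun (d : PySem.Dict String Int) p => d.insert p.2 p.1) PySem.Dict.empty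
  let order := PySem.List.sorted first.keys (fun w => first.getD w 0) false
  (PySem.List.enumerate order 0).map (fun p => (p.2, p.1))

-- ===== PRECONDITION & SPEC =====
def Spec_mapWordId (contents : List (List String)) (out : List (String × Int)) : Prop := out = mapWordId_alt contents
instance (contents : List (List String)) (out : List (String × Int)) : Decidable (Spec_mapWordId contents out) := by unfold Spec_mapWordId; infer_instance

-- ===== CLAIM (what is proved, stated in full; the proofs are below) =====
def Claim_equal_mapWordId : Prop := ∀ (contents : List (List String)), Dom_mapWordId contents → Spec_mapWordId contents (mapWordId contents)

-- ===== LEMMAS AND PROOFS =====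

-- the dict A has built after seeing exactly the distinct words us (in order)
def pvMkD (us : List String) : PySem.Dict String Int :=
  PySem.Dict.mk ((PySem.List.enumerate us 0).map (fun p => (p.2, p.1)))

theorem pvMkD_keys (us : List String) : (pvMkD us).keys = us := by
  simp [pvMkD, PySem.Dict.keys, List.map_map, Function.comp_def,
        PySem.List.map_snd_enumerate]

theorem pvMkD_contains (us : List String) (w : String) :
    (pvMkD us).contains w = decide (w ∈ us) := by
  rw [PySem.Dict.contains_eq_decide_mem_keys, pvMkD_keys]

theorem pvMkD_insert (us : List String) (w : String) (h : w ∉ us) :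
    (pvMkD us).insert w ((us.length : Int)) = pvMkD (us ++ [w]) := by
  apply PySem.Dict.ext
  rw [PySem.Dict.items_insert_of_not_contains]
  · simp [pvMkD, PySem.List.enumerate_append,
          PySem.List.enumerate_cons, PySem.List.enumerate_nil]
  · rw [pvMkD_contains]; simp [h]

-- step function of A's inner loop
def pvStep (acc : PySem.Dict String Int × Int) (word : String) : PySem.Dict String Int × Int :=
  if acc.1.contains word then acc
  else (acc.1.insert word acc.2, acc.2 + 1)

theorem pvStep_state (us : List String) (w : String) :
    pvStep (pvMkD us, (us.length : Int)) w
      = (pvMkD (PySem.Set.add us w), ((PySem.Set.add us w).length : Int)) := by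
  by_cases h : w ∈ us
  · simp [pvStep, pvMkD_contains, PySem.Set.add, PySem.Set.contains, List.contains_eq_mem, h]
  · simp [pvStep, pvMkD_contains, h, PySem.Set.add, PySem.Set.contains, List.contains_eq_mem, pvMkD_insert us w h]

theorem pvFold_state (ws us : List String) :
    ws.foldl pvStep (pvMkD us, (us.length : Int))
      = (pvMkD (PySem.Set.update us ws), ((PySem.Set.update us ws).length : Int)) := by
  induction ws generalizing us with
  | nil => simp [PySem.Set.update]
  | cons w ws ih =>
      rw [List.foldl_cons, pvStep_state, ih, PySem.Set.update_cons]

-- a fresh head comes straight off the accumulator, the rest updates over the filtered tail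
theorem pvUpdate_cons_head (l : List String) (acc : List String) (w : String) (hw : w ∉ acc) :
    PySem.Set.update (w :: acc) l = w :: PySem.Set.update acc (l.filter (fun x => x ≠ w)) := by
  induction l generalizing acc with
  | nil => rfl
  | cons x l ih =>
      by_cases hx : x = w
      · subst hx
        have hadd : PySem.Set.add (x :: acc) x = x :: acc := by
          simp [PySem.Set.add, PySem.Set.contains, List.contains_eq_mem]
        simp only [List.filter_cons, decide_eq_true_eq]
        rw [if_neg (by simp), PySem.Set.update_cons, hadd, ih acc hw]
      · have hadd : PySem.Set.add (w :: acc) x = w :: PySem.Set.add acc x := by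
          by_cases hm : x ∈ acc
          · simp [PySem.Set.add, PySem.Set.contains, List.contains_eq_mem, hm, hx]
          · simp [PySem.Set.add, PySem.Set.contains, List.contains_eq_mem, hm, hx]
        simp only [List.filter_cons, decide_eq_true_eq]
        rw [if_pos (by simpa using hx), PySem.Set.update_cons, hadd,
            PySem.Set.update_cons,
            ih (PySem.Set.add acc x)
              (by rw [PySem.Set.mem_add]; rintro (h | h); exact hw h; exact hx h.symm)]

-- ordered dedup peels a head and discards its later copies
theorem pvDedup_cons (w : String) (rest : List String) :
    PySem.List.dedup (w :: rest)
      = w :: PySem.List.dedup (rest.filter (fun x => x ≠ w)) := by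
  rw [PySem.List.dedup_eq_ofList, PySem.List.dedup_eq_ofList,
      PySem.Set.ofList_eq_foldl, PySem.Set.ofList_eq_foldl]
  show PySem.Set.update [] (w :: rest)
        = w :: PySem.Set.update [] (rest.filter (fun x => x ≠ w))
  rw [PySem.Set.update_cons]
  have hadd : PySem.Set.add [] w = [w] := by
    simp [PySem.Set.add, PySem.Set.contains]
  rw [hadd, pvUpdate_cons_head rest [] w (by simp)]

-- first-occurrence index, total on members
def pvIdx (l : List String) (w : String) : Nat := (PySem.List.index? l w).getD 0

theorem pvIdx_cons_self (x : String) (l : List String) : pvIdx (x :: l) x = 0 := by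
  rw [pvIdx, PySem.List.index?_cons_self]; rfl

theorem pvIdx_cons_ne (x w : String) (l : List String) (hx : x ≠ w) (hw : w ∈ l) :
    pvIdx (x :: l) w = pvIdx l w + 1 := by
  obtain ⟨k, hk⟩ := Option.isSome_iff_exists.mp ((PySem.List.index?_isSome_iff l w).mpr hw)
  rw [pvIdx, pvIdx, PySem.List.index?_cons_of_ne l hx, hk]
  rfl

-- filtering preserves the relative order of first occurrences
theorem pvIdx_filter_mono (p : String → Bool) (l : List String) (a b : String)
    (ha : a ∈ l.filter p) (hb : b ∈ l.filter p)
    (h : pvIdx (l.filter p) a < pvIdx (l.filter p) b) : pvIdx l a < pvIdx l b := by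
  induction l with
  | nil => simp at ha
  | cons x rest ih =>
      have hpa : p a = true := (List.mem_filter.mp ha).2
      have hpb : p b = true := (List.mem_filter.mp hb).2
      by_cases hpx : p x = true
      · rw [List.filter_cons_of_pos hpx] at ha hb h
        by_cases hax : a = x
        · subst hax
          have hba : b ≠ a := by
            rintro rfl; exact absurd h (lt_irrefl _)
          have hbr : b ∈ rest := by
            rcases List.mem_cons.mp hb with h' | h'
            · exact absurd h' hba
            · exact (List.mem_filter.mp h').1
          rw [pvIdx_cons_self, pvIdx_cons_ne a b rest (fun e => hba e.symm) hbr]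
          omega
        · by_cases hbx : b = x
          · subst hbx
            rw [pvIdx_cons_self] at h
            have har : a ∈ rest.filter p := by
              rcases List.mem_cons.mp ha with h' | h'
              · exact absurd h' hax
              · exact h'
            rw [pvIdx_cons_ne b a _ (fun e => hax e.symm) har] at h
            omega
          · have har : a ∈ rest.filter p := by
              rcases List.mem_cons.mp ha with h' | h'
              · exact absurd h' hax
              · exact h'
            have hbr : b ∈ rest.filter p := by
              rcases List.mem_cons.mp hb with h' | h'
              · exact absurd h' hbx
              · exact h'
            rw [pvIdx_cons_ne x a _ (fun e => hax e.symm) har,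
                pvIdx_cons_ne x b _ (fun e => hbx e.symm) hbr] at h
            have := ih har hbr (by omega)
            rw [pvIdx_cons_ne x a rest (fun e => hax e.symm) (List.mem_filter.mp har).1,
                pvIdx_cons_ne x b rest (fun e => hbx e.symm) (List.mem_filter.mp hbr).1]
            omega
      · have hax : a ≠ x := fun e => hpx (e ▸ hpa)
        have hbx : b ≠ x := fun e => hpx (e ▸ hpb)
        rw [List.filter_cons_of_neg (by simpa using hpx)] at ha hb h
        have := ih ha hb h
        rw [pvIdx_cons_ne x a rest (fun e => hax e.symm) (List.mem_filter.mp ha).1,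
            pvIdx_cons_ne x b rest (fun e => hbx e.symm) (List.mem_filter.mp hb).1]
        omega

-- the ordered dedup lists words in strictly increasing first-occurrence order
theorem pvDedup_pairwise_aux (n : Nat) (ws : List String) (h : ws.length ≤ n) :
    (PySem.List.dedup ws).Pairwise (fun a b => pvIdx ws a < pvIdx ws b) := by
  induction n generalizing ws with
  | zero =>
      cases ws with
      | nil => simp [PySem.List.dedup_eq_ofList, PySem.Set.ofList]
      | cons w rest => simp at h
  | succ n ih =>
      cases ws with
      | nil => simp [PySem.List.dedup_eq_ofList, PySem.Set.ofList]
      | cons w rest =>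
          rw [pvDedup_cons]
          have hr : rest.length ≤ n := by simp at h; omega
          constructor
          · intro b hb
            have hb' := (PySem.List.mem_dedup _ _).mp hb
            have hbm : b ∈ rest := (List.mem_filter.mp hb').1
            have hbw : b ≠ w := by simpa using (List.mem_filter.mp hb').2
            rw [pvIdx_cons_self, pvIdx_cons_ne w b rest (fun e => hbw e.symm) hbm]
            omega
          · have htail := ih (rest.filter (fun x => x ≠ w))
              (le_trans (List.length_filter_le _ _) hr)
            refine List.Pairwise.imp_of_mem ?_ htail
            intro a b hadm hbdm hab
            have ha' := (PySem.List.mem_dedup _ _).mp hadm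
            have hb' := (PySem.List.mem_dedup _ _).mp hbdm
            have haw : a ≠ w := by simpa using (List.mem_filter.mp ha').2
            have hbw : b ≠ w := by simpa using (List.mem_filter.mp hb').2
            have := pvIdx_filter_mono _ rest a b ha' hb' hab
            rw [pvIdx_cons_ne w a rest (fun e => haw e.symm) (List.mem_filter.mp ha').1,
                pvIdx_cons_ne w b rest (fun e => hbw e.symm) (List.mem_filter.mp hb').1]
            omega

theorem pvDedup_pairwise (ws : List String) :
    (PySem.List.dedup ws).Pairwise (fun a b => pvIdx ws a < pvIdx ws b) :=
  pvDedup_pairwise_aux ws.length ws le_rfl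

-- the dict built by B's reverse overwrite pass over enumerate ws s
def pvFirst (ws : List String) (s : Int) : PySem.Dict String Int :=
  (PySem.List.enumerate ws s).reverse.foldl
    (fun (d : PySem.Dict String Int) p => d.insert p.2 p.1) PySem.Dict.empty

theorem pvFirst_cons (w : String) (rest : List String) (s : Int) :
    pvFirst (w :: rest) s = (pvFirst rest (s + 1)).insert w s := by
  rw [pvFirst, pvFirst, PySem.List.enumerate_cons, List.reverse_cons, List.foldl_append]
  rfl

theorem pvFirst_mem_keys (ws : List String) (s : Int) (w : String) :
    w ∈ (pvFirst ws s).keys ↔ w ∈ ws := by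
  induction ws generalizing s with
  | nil => simp [pvFirst, PySem.List.enumerate_nil, PySem.Dict.empty, PySem.Dict.keys]
  | cons x rest ih =>
      rw [pvFirst_cons, PySem.Dict.mem_keys_insert, List.mem_cons, ih (s + 1)]

theorem pvFirst_nodup_keys (ws : List String) (s : Int) : (pvFirst ws s).keys.Nodup := by
  induction ws generalizing s with
  | nil => simp [pvFirst, PySem.List.enumerate_nil, PySem.Dict.empty, PySem.Dict.keys]
  | cons x rest ih =>
      rw [pvFirst_cons]
      exact PySem.Dict.nodup_keys_insert _ _ _ (ih (s + 1))

-- B's dict maps each word of ws to s + its first-occurrence index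
theorem pvFirst_getD (ws : List String) (w : String) (hw : w ∈ ws) (s : Int) :
    (pvFirst ws s).getD w 0 = s + (pvIdx ws w : Int) := by
  induction ws generalizing s with
  | nil => simp at hw
  | cons x rest ih =>
      rw [pvFirst_cons, PySem.Dict.getD_insert]
      by_cases hwx : w = x
      · subst hwx; simp [pvIdx_cons_self]
      · have hwr : w ∈ rest := by
          rcases List.mem_cons.mp hw with h' | h'
          · exact absurd h' hwx
          · exact h'
        rw [if_neg hwx, ih hwr (s + 1), pvIdx_cons_ne x w rest (fun e => hwx e.symm) hwr]
        push_cast; ring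

-- sorting the dict's keys by stored position is exactly the ordered dedup
theorem pvSorted_keys (ws : List String) :
    PySem.List.sorted (pvFirst ws 0).keys (fun w => (pvFirst ws 0).getD w 0) false
      = PySem.List.dedup ws := by
  apply PySem.List.sorted_eq_of_perm_of_pairwise_lt
  · rw [List.perm_ext_iff_of_nodup (PySem.List.nodup_dedup _) (pvFirst_nodup_keys ws 0)]
    intro a
    rw [PySem.List.mem_dedup, pvFirst_mem_keys]
  · refine List.Pairwise.imp_of_mem ?_ (pvDedup_pairwise ws)
    intro a b ha hb hab
    have ham : a ∈ ws := (PySem.List.mem_dedup _ _).mp ha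
    have hbm : b ∈ ws := (PySem.List.mem_dedup _ _).mp hb
    rw [pvFirst_getD ws a ham 0, pvFirst_getD ws b hbm 0]
    omega

-- ===== VERDICT (by name: the statement is the Claim_ definition above) =====
theorem mapWordId_spec : Claim_equal_mapWordId := by
  intro contents _
  show mapWordId contents = mapWordId_alt contents
  have hflat : contents.foldl
      (fun (acc : PySem.Dict String Int × Int) st => st.foldl pvStep acc)
      (PySem.Dict.empty, 0)
      = (contents.flatMap (fun st => st)).foldl pvStep (PySem.Dict.empty, 0) := by
    rw [List.foldl_flatMap]
  have hempty : (PySem.Dict.empty, (0 : Int)) = (pvMkD [], ((List.length ([] : List String) : Int))) := by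
    simp [pvMkD, PySem.List.enumerate_nil, PySem.Dict.empty]
  calc mapWordId contents
      = ((contents.flatMap (fun st => st)).foldl pvStep (PySem.Dict.empty, 0)).1.items := by
        rw [mapWordId]
        exact congrArg (fun p => p.1.items) hflat
    _ = (pvMkD (PySem.Set.update [] (contents.flatMap (fun st => st)))).items := by
        rw [hempty, pvFold_state]
    _ = mapWordId_alt contents := by
        rw [PySem.Set.update_nil_left, mapWordId_alt]
        show _ = (PySem.List.enumerate (PySem.List.sorted
            (pvFirst (contents.flatMap (fun st => st)) 0).keys
            (fun w => (pvFirst (contents.flatMap (fun st => st)) 0).getD w 0) false) 0).map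
            (fun p => (p.2, p.1))
        rw [pvSorted_keys, PySem.List.dedup_eq_ofList]
        simp [pvMkD]
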